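-- pv_equiv track=rewrite | github.com/GuiMarolly/Tarefa_Avalia-o_RA02 | main.py | conjunto_M
-- ===== SOURCE A (Python) =====
-- def conjunto_M(num):
--     if num == 2 or num == 3:
--         return True
--     elif num < 2:
--         return False
--     else:
--         for i in range(2, num):
--             if num % i == 0 and conjunto_M(i) and conjunto_M(num // i):
--                 return True
--         return False
-- ===== SOURCE B (Python) =====
-- def conjunto_M(num):
--     if num < 2:
--         return False
--     while num % 2 == 0:
--         num //= 2
--     while num % 3 == 0:
--         num //= 3
--     return num == 1
-- ===== Notes on version B (the rewrite author's own statement) =====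
-- stated objective: faster
-- what changed: Replaces A's recursive factor search over range(2, num) with dividing out the factors 2 and 3 and checking the remainder is 1.
import Mathlib
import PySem

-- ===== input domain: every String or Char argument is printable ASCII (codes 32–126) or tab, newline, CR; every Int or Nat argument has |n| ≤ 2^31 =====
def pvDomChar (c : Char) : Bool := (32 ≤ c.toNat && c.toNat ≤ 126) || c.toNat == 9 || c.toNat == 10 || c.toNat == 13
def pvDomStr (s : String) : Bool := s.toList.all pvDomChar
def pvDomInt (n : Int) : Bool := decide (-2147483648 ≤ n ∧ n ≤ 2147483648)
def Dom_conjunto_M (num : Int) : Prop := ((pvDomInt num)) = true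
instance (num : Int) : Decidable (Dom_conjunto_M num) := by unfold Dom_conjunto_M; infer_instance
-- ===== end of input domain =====

-- B replaces A's recursive trial-factor search with dividing out 2s and 3s (objective: faster).


-- helper used by the ports' termination proofs (cited in decreasing_by)
theorem pv_ediv_lt (num k : Int) (hn : 0 < num) (hk : 2 ≤ k) : num / k < num := by
  have h0 := Int.emod_nonneg num (by omega : k ≠ 0)
  have h1 := Int.emod_lt_of_pos num (by omega : 0 < k)
  have h2 := Int.mul_ediv_add_emod num k
  have hq : 0 ≤ num / k := Int.ediv_nonneg (le_of_lt hn) (by omega)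
  nlinarith [mul_le_mul_of_nonneg_right hk hq]

-- ===== PORT A =====
-- recursive trial division: num is accepted if it is 2 or 3, or has a factor i
-- with both i and num // i accepted
def conjunto_M (num : Int) : Bool :=
  if num = 2 ∨ num = 3 then true
  else if num < 2 then false
  else
    (PySem.List.pyRange 2 num 1).attach.any (fun i =>
      (PySem.Int.mod num i.1 == 0) && conjunto_M i.1 &&
        conjunto_M (PySem.Int.floordiv num i.1))
termination_by num.toNat
decreasing_by
  · have h := (PySem.List.mem_pyRange_one.mp i.2)
    omega
  · have h := (PySem.List.mem_pyRange_one.mp i.2)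
    have h1 : PySem.Int.floordiv num i.1 = num / i.1 :=
      PySem.Int.floordiv_eq_ediv_of_pos (by omega)
    have h2 : num / i.1 < num := pv_ediv_lt _ _ (by omega) (by omega)
    omega


-- ===== PORT B =====
-- `while num % 2 == 0: num //= 2` (the 0 < num guard only makes the loop total;
-- B only reaches it with num ≥ 2)
def pvStrip2 (num : Int) : Int :=
  if 0 < num ∧ PySem.Int.mod num 2 = 0 then pvStrip2 (PySem.Int.floordiv num 2)
  else num
termination_by num.toNat
decreasing_by
  rename_i h
  have h1 : PySem.Int.floordiv num 2 = num / 2 :=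
    PySem.Int.floordiv_eq_ediv_of_pos (by omega)
  have h2 : num / 2 < num := pv_ediv_lt _ _ (by omega) (by omega)
  have h3 : 0 ≤ num / 2 := Int.ediv_nonneg (by omega) (by omega)
  omega

-- `while num % 3 == 0: num //= 3`
def pvStrip3 (num : Int) : Int :=
  if 0 < num ∧ PySem.Int.mod num 3 = 0 then pvStrip3 (PySem.Int.floordiv num 3)
  else num
termination_by num.toNat
decreasing_by
  rename_i h
  have h1 : PySem.Int.floordiv num 3 = num / 3 :=
    PySem.Int.floordiv_eq_ediv_of_pos (by omega)
  have h2 : num / 3 < num := pv_ediv_lt _ _ (by omega) (by omega)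
  have h3 : 0 ≤ num / 3 := Int.ediv_nonneg (by omega) (by omega)
  omega

def conjunto_M_alt (num : Int) : Bool :=
  if num < 2 then false
  else pvStrip3 (pvStrip2 num) == 1

-- ===== PRECONDITION & SPEC =====
def Spec_conjunto_M (num : Int) (out : Bool) : Prop := out = conjunto_M_alt num
instance (num : Int) (out : Bool) : Decidable (Spec_conjunto_M num out) := by unfold Spec_conjunto_M; infer_instance

-- ===== CLAIM (what is proved, stated in full; the proofs are below) =====
def Claim_equal_conjunto_M : Prop := ∀ (num : Int), Dom_conjunto_M num → Spec_conjunto_M num (conjunto_M num)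

-- ===== LEMMAS AND PROOFS =====

theorem pvStrip2_fact : ∀ (N : ℕ) (n : Int), n.toNat ≤ N → 0 < n →
    ∃ a : ℕ, n = 2 ^ a * pvStrip2 n ∧ 0 < pvStrip2 n := by
  intro N
  induction N using Nat.strong_induction_on with
  | _ N IH =>
    intro n hn hpos
    rw [pvStrip2]
    by_cases h : 0 < n ∧ PySem.Int.mod n 2 = 0
    · rw [if_pos h]
      have hm : n % 2 = 0 := by
        rw [← PySem.Int.mod_eq_emod_of_pos (by omega : (0:Int) < 2)]; exact h.2
      have hd : PySem.Int.floordiv n 2 = n / 2 :=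
        PySem.Int.floordiv_eq_ediv_of_pos (by omega)
      have hpos2 : 0 < n / 2 := by omega
      rw [hd]
      obtain ⟨a, ha, hpa⟩ := IH (n / 2).toNat (by omega) (n / 2) le_rfl hpos2
      refine ⟨a + 1, ?_, hpa⟩
      have h2 : n = 2 * (n / 2) := by omega
      rw [pow_succ]
      calc n = 2 * (n / 2) := h2
        _ = 2 * (2 ^ a * pvStrip2 (n / 2)) := by rw [← ha]
        _ = 2 ^ a * 2 * pvStrip2 (n / 2) := by ring
    · rw [if_neg h]
      exact ⟨0, by simp, hpos⟩

theorem pvStrip3_fact : ∀ (N : ℕ) (n : Int), n.toNat ≤ N → 0 < n →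
    ∃ b : ℕ, n = 3 ^ b * pvStrip3 n ∧ 0 < pvStrip3 n := by
  intro N
  induction N using Nat.strong_induction_on with
  | _ N IH =>
    intro n hn hpos
    rw [pvStrip3]
    by_cases h : 0 < n ∧ PySem.Int.mod n 3 = 0
    · rw [if_pos h]
      have hm : n % 3 = 0 := by
        rw [← PySem.Int.mod_eq_emod_of_pos (by omega : (0:Int) < 3)]; exact h.2
      have hd : PySem.Int.floordiv n 3 = n / 3 :=
        PySem.Int.floordiv_eq_ediv_of_pos (by omega)
      have hpos3 : 0 < n / 3 := by omega
      rw [hd]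
      obtain ⟨b, hb, hpb⟩ := IH (n / 3).toNat (by omega) (n / 3) le_rfl hpos3
      refine ⟨b + 1, ?_, hpb⟩
      have h3 : n = 3 * (n / 3) := by omega
      rw [pow_succ]
      calc n = 3 * (n / 3) := h3
        _ = 3 * (3 ^ b * pvStrip3 (n / 3)) := by rw [← hb]
        _ = 3 ^ b * 3 * pvStrip3 (n / 3) := by ring
    · rw [if_neg h]
      exact ⟨0, by simp, hpos⟩

theorem pvStrip2_smooth : ∀ (a b : ℕ), pvStrip2 ((2:Int) ^ a * 3 ^ b) = 3 ^ b := by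
  intro a b
  induction a with
  | zero =>
    rw [pow_zero, one_mul, pvStrip2, if_neg]
    rintro ⟨-, hmod⟩
    have hodd : Odd ((3:Int) ^ b) := (by decide : Odd (3:Int)).pow
    rw [PySem.Int.mod_eq_emod_of_pos (by omega : (0:Int) < 2)] at hmod
    rw [Int.odd_iff] at hodd
    omega
  | succ a ih =>
    have hrw : (2:Int) ^ (a + 1) * 3 ^ b = 2 * (2 ^ a * 3 ^ b) := by ring
    have hdvd : (2:Int) ∣ 2 ^ (a + 1) * 3 ^ b := ⟨2 ^ a * 3 ^ b, hrw⟩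
    have hpos : (0:Int) < 2 ^ (a + 1) * 3 ^ b := by positivity
    have hmod : PySem.Int.mod ((2:Int) ^ (a + 1) * 3 ^ b) 2 = 0 := by
      rw [PySem.Int.mod_eq_emod_of_pos (by omega : (0:Int) < 2)]
      exact Int.emod_eq_zero_of_dvd hdvd
    rw [pvStrip2, if_pos ⟨hpos, hmod⟩]
    have hfd : PySem.Int.floordiv ((2:Int) ^ (a + 1) * 3 ^ b) 2 = 2 ^ a * 3 ^ b := by
      rw [PySem.Int.floordiv_eq_ediv_of_pos (by omega), hrw,
        Int.mul_ediv_cancel_left _ (by omega : (2:Int) ≠ 0)]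
    rw [hfd, ih]

theorem pvStrip3_pow : ∀ (b : ℕ), pvStrip3 ((3:Int) ^ b) = 1 := by
  intro b
  induction b with
  | zero =>
    rw [pow_zero, pvStrip3, if_neg]
    rintro ⟨-, hmod⟩
    rw [PySem.Int.mod_eq_emod_of_pos (by omega : (0:Int) < 3)] at hmod
    omega
  | succ b ih =>
    have hrw : (3:Int) ^ (b + 1) = 3 * 3 ^ b := by ring
    have hdvd : (3:Int) ∣ 3 ^ (b + 1) := ⟨3 ^ b, hrw⟩
    have hpos : (0:Int) < 3 ^ (b + 1) := by positivity
    have hmod : PySem.Int.mod ((3:Int) ^ (b + 1)) 3 = 0 := by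
      rw [PySem.Int.mod_eq_emod_of_pos (by omega : (0:Int) < 3)]
      exact Int.emod_eq_zero_of_dvd hdvd
    rw [pvStrip3, if_pos ⟨hpos, hmod⟩]
    have hfd : PySem.Int.floordiv ((3:Int) ^ (b + 1)) 3 = 3 ^ b := by
      rw [PySem.Int.floordiv_eq_ediv_of_pos (by omega), hrw,
        Int.mul_ediv_cancel_left _ (by omega : (3:Int) ≠ 0)]
    rw [hfd, ih]

theorem pvAlt_iff (n : Int) : conjunto_M_alt n = true ↔
    (2 ≤ n ∧ ∃ a b : ℕ, n = 2 ^ a * 3 ^ b) := by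
  unfold conjunto_M_alt
  by_cases hlt : n < 2
  · rw [if_pos hlt]
    simp only [Bool.false_eq_true, false_iff, not_and]
    intro h
    exact fun _ => by omega
  · rw [if_neg hlt]
    simp only [beq_iff_eq]
    constructor
    · intro h1
      obtain ⟨a, ha, hpa⟩ := pvStrip2_fact n.toNat n le_rfl (by omega)
      obtain ⟨b, hb, -⟩ := pvStrip3_fact (pvStrip2 n).toNat (pvStrip2 n) le_rfl hpa
      refine ⟨by omega, a, b, ?_⟩
      rw [ha, hb, h1, mul_one]
    · rintro ⟨-, a, b, heq⟩
      rw [heq, pvStrip2_smooth, pvStrip3_pow]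

theorem pvA_iff : ∀ (N : ℕ) (n : Int), n.toNat ≤ N →
    (conjunto_M n = true ↔ (2 ≤ n ∧ ∃ a b : ℕ, n = 2 ^ a * 3 ^ b)) := by
  intro N
  induction N using Nat.strong_induction_on with
  | _ N IH =>
    intro n hn
    rw [conjunto_M]
    by_cases h23 : n = 2 ∨ n = 3
    · rw [if_pos h23]
      simp only [true_iff]
      rcases h23 with h | h <;> subst h
      · exact ⟨by norm_num, 1, 0, by norm_num⟩
      · exact ⟨by norm_num, 0, 1, by norm_num⟩
    · rw [if_neg h23]
      by_cases hlt : n < 2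
      · rw [if_pos hlt]
        simp only [Bool.false_eq_true, false_iff, not_and]
        intro h
        exact fun _ => by omega
      · rw [if_neg hlt]
        have hn4 : 4 ≤ n := by omega
        simp only [List.any_eq_true, List.mem_attach, Bool.and_eq_true, beq_iff_eq, true_and,
          Subtype.exists]
        constructor
        · rintro ⟨i, hmem, ⟨hmod, hci⟩, hcd⟩
          have hi := PySem.List.mem_pyRange_one.mp hmem
          have hdvd : i ∣ n := by
            rw [PySem.Int.mod_eq_emod_of_pos (by omega : (0:Int) < i)] at hmod
            exact Int.dvd_of_emod_eq_zero hmod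
          rw [PySem.Int.floordiv_eq_ediv_of_pos (by omega : (0:Int) < i)] at hcd
          have hq_lt : n / i < n := pv_ediv_lt n i (by omega) hi.1
          obtain ⟨k, hk⟩ := hdvd
          have hkq : n / i = k := by
            rw [hk, Int.mul_ediv_cancel_left _ (by omega : i ≠ 0)]
          have hq2 : 2 ≤ n / i := by rw [hkq]; nlinarith [hi.1, hi.2]
          obtain ⟨-, a1, b1, hi_eq⟩ := (IH i.toNat (by omega) i le_rfl).mp hci
          obtain ⟨-, a2, b2, hd_eq⟩ := (IH (n / i).toNat (by omega) (n / i) le_rfl).mp hcd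
          refine ⟨by omega, a1 + a2, b1 + b2, ?_⟩
          calc n = i * (n / i) := by rw [hkq]; exact hk
            _ = 2 ^ (a1 + a2) * 3 ^ (b1 + b2) := by
                rw [hd_eq, hi_eq, pow_add, pow_add]; ring
        · rintro ⟨-, a, b, heq⟩
          cases a with
          | zero =>
            rw [pow_zero, one_mul] at heq
            have hb : 2 ≤ b := by
              by_contra hb
              interval_cases b <;> omega
            have h9 : (9:Int) ≤ n := by
              rw [heq]
              calc (9:Int) = 3 ^ 2 := by norm_num
                _ ≤ 3 ^ b := pow_le_pow_right₀ (by norm_num) hb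
            refine ⟨3, PySem.List.mem_pyRange_one.mpr ⟨by omega, by omega⟩, ⟨?_, ?_⟩, ?_⟩
            · rw [PySem.Int.mod_eq_emod_of_pos (by omega : (0:Int) < 3)]
              refine Int.emod_eq_zero_of_dvd ⟨3 ^ (b - 1), ?_⟩
              rw [heq, ← pow_succ']
              congr 1
              omega
            · exact (IH 3 (by omega) 3 (by norm_num)).mpr ⟨by norm_num, 0, 1, by norm_num⟩
            · have hfd : PySem.Int.floordiv n 3 = 3 ^ (b - 1) := by
                rw [PySem.Int.floordiv_eq_ediv_of_pos (by omega),
                  show n = 3 * 3 ^ (b - 1) by rw [heq, ← pow_succ']; congr 1; omega,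
                  Int.mul_ediv_cancel_left _ (by omega : (3:Int) ≠ 0)]
              rw [hfd]
              have h3le : (3:Int) ≤ 3 ^ (b - 1) := by
                calc (3:Int) = 3 ^ 1 := by norm_num
                  _ ≤ 3 ^ (b - 1) := pow_le_pow_right₀ (by norm_num) (by omega)
              have hlt : (3:Int) ^ (b - 1) < n := by
                rw [heq]
                have : (3:Int) ^ b = 3 * 3 ^ (b - 1) := by
                  rw [← pow_succ']; congr 1; omega
                nlinarith
              refine (IH (((3:Int) ^ (b - 1)).toNat) (by omega) _ le_rfl).mpr
                ⟨by omega, 0, b - 1, by rw [pow_zero, one_mul]⟩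
          | succ a' =>
            have hrw : n = 2 * (2 ^ a' * 3 ^ b) := by rw [heq]; ring
            have hm : 2 ≤ 2 ^ a' * (3:Int) ^ b := by omega
            refine ⟨2, PySem.List.mem_pyRange_one.mpr ⟨by omega, by omega⟩, ⟨?_, ?_⟩, ?_⟩
            · rw [PySem.Int.mod_eq_emod_of_pos (by omega : (0:Int) < 2)]
              exact Int.emod_eq_zero_of_dvd ⟨2 ^ a' * 3 ^ b, hrw⟩
            · exact (IH 2 (by omega) 2 (by norm_num)).mpr ⟨by norm_num, 1, 0, by norm_num⟩
            · have hfd : PySem.Int.floordiv n 2 = 2 ^ a' * 3 ^ b := by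
                rw [PySem.Int.floordiv_eq_ediv_of_pos (by omega), hrw,
                  Int.mul_ediv_cancel_left _ (by omega : (2:Int) ≠ 0)]
              rw [hfd]
              have hlt : 2 ^ a' * (3:Int) ^ b < n := by omega
              refine (IH ((2 ^ a' * (3:Int) ^ b).toNat) (by omega) _ le_rfl).mpr
                ⟨hm, a', b, rfl⟩

-- ===== VERDICT (by name: the statement is the Claim_ definition above) =====
theorem conjunto_M_spec : Claim_equal_conjunto_M := by
  intro num _
  unfold Spec_conjunto_M
  have hA := pvA_iff num.toNat num le_rfl
  have hB := pvAlt_iff num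
  cases hA' : conjunto_M num
  · cases hB' : conjunto_M_alt num
    · rfl
    · exact absurd (hA.mpr (hB.mp hB')) (by simp [hA'])
  · exact (hB.mpr (hA.mp hA')).symm
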